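-- pv_equiv track=rewrite | github.com/jim-min/4Codingtest | prgrmrs/LV1/82612.py | solution
-- ===== SOURCE A (Python) =====
-- def solution(price, money, count):
--     answer = 0
--     for i in range(1, count + 1):
--         answer += i*price
--
--     if money > answer:
--         return 0
--
--     else:
--         return answer - money
-- ===== SOURCE B (Python) =====
-- def solution(price, money, count):
--     n = count if count > 0 else 0
--     total = price * n * (n + 1) // 2
--     shortfall = total - money
--     return shortfall if shortfall > 0 else 0
-- ===== Notes on version B (the rewrite author's own statement) =====
-- stated objective: faster
-- what changed: Replaced the O(count) summation loop over range(1, count+1) with the closed-form arithmetic-series formula price*n*(n+1)//2 (with n clamped to 0 for non-positive count).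
import Mathlib
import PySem

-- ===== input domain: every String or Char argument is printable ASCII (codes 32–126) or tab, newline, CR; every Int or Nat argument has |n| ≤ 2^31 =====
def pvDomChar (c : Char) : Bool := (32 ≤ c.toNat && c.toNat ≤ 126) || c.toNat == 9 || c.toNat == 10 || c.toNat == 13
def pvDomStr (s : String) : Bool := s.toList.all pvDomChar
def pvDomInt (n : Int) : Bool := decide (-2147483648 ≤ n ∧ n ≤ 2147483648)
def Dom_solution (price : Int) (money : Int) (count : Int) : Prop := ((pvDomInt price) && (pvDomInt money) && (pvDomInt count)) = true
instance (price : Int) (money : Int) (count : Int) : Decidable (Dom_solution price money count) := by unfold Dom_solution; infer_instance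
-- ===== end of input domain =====

-- B replaces A's O(count) summation loop by the closed-form arithmetic series (faster, asymptotic).

-- ===== PORT A =====
def solution (price : Int) (money : Int) (count : Int) : Int :=
  let answer : Int := (PySem.List.pyRange 1 (count + 1) 1).foldl (fun acc i => acc + i * price) 0
  if money > answer then 0 else answer - money

-- ===== PORT B =====
def solution_alt (price : Int) (money : Int) (count : Int) : Int :=
  let n : Int := if count > 0 then count else 0
  let total : Int := PySem.Int.floordiv (price * n * (n + 1)) 2
  let shortfall : Int := total - money
  if shortfall > 0 then shortfall else 0

-- ===== PRECONDITION & SPEC =====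
def Spec_solution (price : Int) (money : Int) (count : Int) (out : Int) : Prop := out = solution_alt price money count
instance (price : Int) (money : Int) (count : Int) (out : Int) : Decidable (Spec_solution price money count out) := by unfold Spec_solution; infer_instance

-- ===== CLAIM (what is proved, stated in full; the proofs are below) =====
def Claim_equal_solution : Prop := ∀ (price : Int) (money : Int) (count : Int), Dom_solution price money count → Spec_solution price money count (solution price money count)

-- ===== LEMMAS AND PROOFS =====

-- twice A's accumulated sum over range(1, n+1) is price * n * (n+1)
theorem pv_sum_loop (price : Int) : ∀ (n : Nat),
    2 * ((List.range n).map (fun k : Nat => (1 : Int) + (k : Int))).foldl (fun acc i => acc + i * price) 0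
      = price * n * (n + 1) := by
  intro n
  induction n with
  | zero => simp
  | succ m ih =>
    rw [List.range_succ, List.map_append, List.foldl_append]
    simp only [List.map_cons, List.map_nil, List.foldl_cons, List.foldl_nil]
    push_cast
    push_cast at ih
    linear_combination ih

theorem pv_answer_eq (price count : Int) :
    (PySem.List.pyRange 1 (count + 1) 1).foldl (fun acc i => acc + i * price) 0
      = PySem.Int.floordiv (price * (if count > 0 then count else 0) * ((if count > 0 then count else 0) + 1)) 2 := by
  rw [PySem.List.pyRange_one]
  have hs := pv_sum_loop price (count + 1 - 1).toNat
  split_ifs with h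
  · have hc : ((count + 1 - 1).toNat : Int) = count := by omega
    rw [hc] at hs
    rw [eq_comm, PySem.Int.floordiv_eq_iff_of_pos (by omega)]
    omega
  · have hc : (count + 1 - 1).toNat = 0 := by omega
    rw [hc] at hs ⊢
    rw [eq_comm, PySem.Int.floordiv_eq_iff_of_pos (by omega)]
    simp

-- ===== VERDICT (by name: the statement is the Claim_ definition above) =====
theorem solution_spec : Claim_equal_solution := by
  intro price money count _
  unfold Spec_solution solution solution_alt
  simp only [pv_answer_eq price count]
  omega
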